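-- pv_equiv track=rewrite | github.com/NickB03/vana | scripts/memory_quality_manager.py | _has_conflicts
-- ===== SOURCE A (Python) =====
-- from typing import Dict, List, Set, Tuple
--
-- def _has_conflicts(observations: List[str]) -> bool:
--     """Check if observations conflict with each other"""
--     # Simple conflict detection - could be enhanced with NLP
--     conflict_pairs = [
--         ('mandatory', 'optional'),
--         ('required', 'optional'),
--         ('operational', 'down'),
--         ('working', 'broken')
--     ]
--
--     obs_lower = [obs.lower() for obs in observations]
--
--     for word1, word2 in conflict_pairs:
--         if any(word1 in obs for obs in obs_lower) and any(word2 in obs for obs in obs_lower):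
--             return True
--
--     return False
-- ===== SOURCE B (Python) =====
-- def _has_conflicts(observations):
--     """Check if observations conflict with each other"""
--     keywords = ('mandatory', 'optional', 'required',
--                 'operational', 'down', 'working', 'broken')
--     present = set()
--     for obs in observations:
--         low = obs.lower()
--         for kw in keywords:
--             if kw in low:
--                 present.add(kw)
--     pairs = [('mandatory', 'optional'), ('required', 'optional'),
--              ('operational', 'down'), ('working', 'broken')]
--     return any(w1 in present and w2 in present for w1, w2 in pairs)
-- ===== Notes on version B (the rewrite author's own statement) =====
-- stated objective: alternative
-- what changed: B builds a presence set of the seven relevant keywords in one pass over the lowercased observations and then checks the four conflict pairs by set membership, instead of A's per-pair repeated scans over all observations.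
import Mathlib
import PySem

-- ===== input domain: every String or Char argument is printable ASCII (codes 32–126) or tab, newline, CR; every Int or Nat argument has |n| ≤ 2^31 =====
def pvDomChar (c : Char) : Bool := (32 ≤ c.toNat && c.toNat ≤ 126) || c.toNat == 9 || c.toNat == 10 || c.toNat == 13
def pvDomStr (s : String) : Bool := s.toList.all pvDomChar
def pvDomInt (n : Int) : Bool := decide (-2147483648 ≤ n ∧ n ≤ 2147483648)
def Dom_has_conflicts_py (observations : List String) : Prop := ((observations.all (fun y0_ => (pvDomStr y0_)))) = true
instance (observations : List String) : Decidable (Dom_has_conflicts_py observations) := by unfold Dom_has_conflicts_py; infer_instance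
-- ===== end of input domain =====

-- B builds a presence set of the seven keywords in one pass over the lowercased
-- observations and checks the four conflict pairs by set membership, instead of
-- A's per-pair repeated scans (alternative decomposition, same exact result).


-- ===== PORT A =====
def has_conflicts_py (observations : List String) : Bool :=
  let conflict_pairs : List (String × String) :=
    [("mandatory", "optional"), ("required", "optional"),
     ("operational", "down"), ("working", "broken")]
  let obs_lower := observations.map PySem.Str.lower
  -- the 'for … return True' loop over pairs is List.any; each 'any(… for obs in obs_lower)' stays a List.any
  conflict_pairs.any (fun wp =>
    obs_lower.any (fun obs => PySem.Str.isIn wp.1 obs) &&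
    obs_lower.any (fun obs => PySem.Str.isIn wp.2 obs))

-- ===== PORT B =====
def pvKeywords : List String :=
  ["mandatory", "optional", "required", "operational", "down", "working", "broken"]

-- one pass: for each observation, add every keyword occurring in its lowercase form
def pvPresent (observations : List String) : PySem.Set String :=
  observations.foldl (fun present obs =>
    let low := PySem.Str.lower obs
    pvKeywords.foldl (fun p kw => if PySem.Str.isIn kw low then PySem.Set.add p kw else p) present)
    PySem.Set.empty

def has_conflicts_py_alt (observations : List String) : Bool :=
  let present := pvPresent observations
  let pairs : List (String × String) :=
    [("mandatory", "optional"), ("required", "optional"),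
     ("operational", "down"), ("working", "broken")]
  pairs.any (fun wp => PySem.Set.contains present wp.1 && PySem.Set.contains present wp.2)

-- ===== PRECONDITION & SPEC =====
def Spec_has_conflicts_py (observations : List String) (out : Bool) : Prop := out = has_conflicts_py_alt observations
instance (observations : List String) (out : Bool) : Decidable (Spec_has_conflicts_py observations out) := by unfold Spec_has_conflicts_py; infer_instance

-- ===== CLAIM (what is proved, stated in full; the proofs are below) =====
def Claim_equal_has_conflicts_py : Prop := ∀ (observations : List String), Dom_has_conflicts_py observations → Spec_has_conflicts_py observations (has_conflicts_py observations)

-- ===== LEMMAS AND PROOFS =====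

-- membership after the inner fold over the keyword list
lemma mem_foldl_add_if {c : String → Bool} (ks : List String) (s : PySem.Set String) (w : String) :
    (w ∈ ks.foldl (fun p kw => if c kw then PySem.Set.add p kw else p) s) ↔
      w ∈ s ∨ (w ∈ ks ∧ c w) := by
  induction ks generalizing s with
  | nil => simp
  | cons k ks ih =>
    simp only [List.foldl_cons, ih, List.mem_cons]
    split
    · rename_i hk
      rw [PySem.Set.mem_add]
      constructor
      · rintro ((h | rfl) | h)
        · exact Or.inl h
        · exact Or.inr ⟨Or.inl rfl, hk⟩
        · exact Or.inr ⟨Or.inr h.1, h.2⟩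
      · rintro (h | ⟨(rfl | h), hc⟩)
        · exact Or.inl (Or.inl h)
        · exact Or.inl (Or.inr rfl)
        · exact Or.inr ⟨h, hc⟩
    · rename_i hk
      constructor
      · rintro (h | h)
        · exact Or.inl h
        · exact Or.inr ⟨Or.inr h.1, h.2⟩
      · rintro (h | ⟨(rfl | h), hc⟩)
        · exact Or.inl h
        · exact absurd hc hk
        · exact Or.inr ⟨h, hc⟩

-- membership in the presence set characterised
lemma mem_pvPresent (observations : List String) (w : String) :
    (w ∈ pvPresent observations) ↔
      w ∈ pvKeywords ∧ ∃ o ∈ observations, PySem.Str.isIn w (PySem.Str.lower o) = true := by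
  unfold pvPresent
  suffices h : ∀ (s : PySem.Set String),
      (w ∈ observations.foldl (fun present obs =>
        pvKeywords.foldl (fun p kw => if PySem.Str.isIn kw (PySem.Str.lower obs) then PySem.Set.add p kw else p) present) s) ↔
      w ∈ s ∨ (w ∈ pvKeywords ∧ ∃ o ∈ observations, PySem.Str.isIn w (PySem.Str.lower o) = true) by
    simpa [PySem.Set.empty] using h PySem.Set.empty
  induction observations with
  | nil => simp
  | cons o os ih =>
    intro s
    simp only [List.foldl_cons, ih, mem_foldl_add_if, List.mem_cons]
    constructor
    · rintro ((h | ⟨hk, hc⟩) | ⟨hk, o', ho', hc⟩)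
      · exact Or.inl h
      · exact Or.inr ⟨hk, o, Or.inl rfl, hc⟩
      · exact Or.inr ⟨hk, o', Or.inr ho', hc⟩
    · rintro (h | ⟨hk, o', (rfl | ho'), hc⟩)
      · exact Or.inl (Or.inl h)
      · exact Or.inl (Or.inr ⟨hk, hc⟩)
      · exact Or.inr ⟨hk, o', ho', hc⟩

-- for a keyword, the one-pass presence set agrees with A's repeated scan
lemma contains_pvPresent (observations : List String) (w : String) (hw : w ∈ pvKeywords) :
    PySem.Set.contains (pvPresent observations) w =
      (observations.map PySem.Str.lower).any (fun obs => PySem.Str.isIn w obs) := by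
  rcases h : (observations.map PySem.Str.lower).any (fun obs => PySem.Str.isIn w obs) with _ | _
  · simp only [List.any_eq_false, List.mem_map] at h
    simp only [PySem.Set.contains, List.contains_eq_mem, decide_eq_false_iff_not, mem_pvPresent]
    rintro ⟨-, o, ho, hc⟩
    exact absurd hc (by simpa using h _ ⟨o, ho, rfl⟩)
  · simp only [List.any_eq_true, List.mem_map] at h
    obtain ⟨_, ⟨o, ho, rfl⟩, hc⟩ := h
    simp only [PySem.Set.contains, List.contains_eq_mem, decide_eq_true_eq, mem_pvPresent]
    exact ⟨hw, o, ho, by simpa using hc⟩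

-- ===== VERDICT (by name: the statement is the Claim_ definition above) =====
theorem has_conflicts_py_spec : Claim_equal_has_conflicts_py := by
  intro observations _
  unfold Spec_has_conflicts_py has_conflicts_py has_conflicts_py_alt
  simp only [List.any_cons, List.any_nil]
  rw [contains_pvPresent observations "mandatory" (by decide),
      contains_pvPresent observations "optional" (by decide),
      contains_pvPresent observations "required" (by decide),
      contains_pvPresent observations "operational" (by decide),
      contains_pvPresent observations "down" (by decide),
      contains_pvPresent observations "working" (by decide),
      contains_pvPresent observations "broken" (by decide)]
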